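-- pv_equiv track=rewrite | github.com/profangrybeard/Malifaux4eDB | pipeline/parse_cards.py | clean_doubled_text
-- ===== SOURCE A (Python) =====
-- def clean_doubled_text(text: str) -> str:
--     """
--     Fix doubled text that appears in some PDFs due to layering.
--     e.g., "FFIIRRSS GGOOLLEEMM" -> "FIRE GOLEM"
--     """
--     # This handles the specific doubling pattern seen in the PDFs
--     result = []
--     i = 0
--     while i < len(text):
--         if i + 1 < len(text) and text[i] == text[i + 1]:
--             result.append(text[i])
--             i += 2
--         else:
--             result.append(text[i])
--             i += 1
--     return ''.join(result)
-- ===== SOURCE B (Python) =====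
-- def clean_doubled_text(text: str) -> str:
--     # Run-length approach: for each maximal run of one character of length L,
--     # greedy pairwise collapsing leaves ceil(L/2) copies.
--     out = []
--     n = len(text)
--     i = 0
--     while i < n:
--         j = i + 1
--         while j < n and text[j] == text[i]:
--             j += 1
--         out.append(text[i] * ((j - i + 1) // 2))
--         i = j
--     return ''.join(out)
-- ===== Notes on version B (the rewrite author's own statement) =====
-- stated objective: alternative
-- what changed: A scans overlapping index pairs (i, i+1) emitting one char and skipping 1 or 2; B groups the text into maximal runs of equal characters and emits ceil(run_length/2) copies per run in one bulk string-repeat per run.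
import Mathlib
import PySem

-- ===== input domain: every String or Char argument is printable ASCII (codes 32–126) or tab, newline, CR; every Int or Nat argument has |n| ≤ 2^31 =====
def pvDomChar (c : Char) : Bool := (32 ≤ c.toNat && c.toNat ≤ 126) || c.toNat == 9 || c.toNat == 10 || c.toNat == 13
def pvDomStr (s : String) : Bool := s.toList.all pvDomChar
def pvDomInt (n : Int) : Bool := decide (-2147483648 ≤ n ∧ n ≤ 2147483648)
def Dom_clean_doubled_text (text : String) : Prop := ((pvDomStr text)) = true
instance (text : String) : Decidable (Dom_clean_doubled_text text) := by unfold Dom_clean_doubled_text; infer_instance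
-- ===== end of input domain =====

-- B replaces A's index loop over overlapping pairs by run-length grouping (each maximal
-- run of length L keeps ceil(L/2) copies); alternative decomposition, same cost.

-- ===== PORT A =====
-- A's while loop over index i: look at text[i] and text[i+1]; if equal, emit one and skip 2,
-- else emit one and skip 1.  Transcribed as structural recursion on the char list.
def cleanA : List Char → List Char
  | [] => []
  | [c] => [c]
  | c :: d :: rest =>
    if c == d then c :: cleanA rest
    else c :: cleanA (d :: rest)

def clean_doubled_text (text : String) : String :=
  String.mk (cleanA text.toList)

-- ===== PORT B =====
-- B's outer while loop: find the end j of the current run of text[i], emit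
-- (j - i + 1) // 2 copies, continue at j.  Here the run after the head has
-- length k = takeWhile length, total run k+1, emit (k+2)/2 copies.
def runsB : List Char → List Char
  | [] => []
  | c :: rest =>
    let k := (rest.takeWhile (· == c)).length
    List.replicate ((k + 2) / 2) c ++ runsB (rest.drop k)
  termination_by l => l.length
  decreasing_by
    simp only [List.length_drop, List.length_cons]
    omega

def clean_doubled_text_alt (text : String) : String :=
  String.mk (runsB text.toList)

-- ===== PRECONDITION & SPEC =====
def Spec_clean_doubled_text (text : String) (out : String) : Prop := out = clean_doubled_text_alt text
instance (text : String) (out : String) : Decidable (Spec_clean_doubled_text text out) := by unfold Spec_clean_doubled_text; infer_instance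

-- ===== CLAIM (what is proved, stated in full; the proofs are below) =====
def Claim_equal_clean_doubled_text : Prop := ∀ (text : String), Dom_clean_doubled_text text → Spec_clean_doubled_text text (clean_doubled_text text)

-- ===== LEMMAS AND PROOFS =====

theorem dropWhile_eq_drop_len_takeWhile (p : Char → Bool) (l : List Char) :
    l.dropWhile p = l.drop (l.takeWhile p).length := by
  induction l with
  | nil => rfl
  | cons a t ih => by_cases h : p a <;> simp [List.takeWhile, List.dropWhile, h, ih]

theorem head?_dropWhile_not (p : Char → Bool) (l : List Char) (a : Char)
    (h : (l.dropWhile p).head? = some a) : ¬ p a := by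
  induction l with
  | nil => simp [List.dropWhile] at h
  | cons b t ih =>
    by_cases hb : p b
    · simp [List.dropWhile, hb] at h; exact ih h
    · simp [List.dropWhile, hb] at h; subst h; exact hb

theorem takeWhile_eq_replicate (c : Char) (l : List Char) :
    l.takeWhile (· == c) = List.replicate (l.takeWhile (· == c)).length c := by
  apply List.eq_replicate_length.mpr
  intro b hb
  have := List.mem_takeWhile_imp hb
  simpa using this

-- A on a run: cleanA (cᵏ ++ t) = c^⌈k/2⌉ ++ cleanA t, provided t does not start with c.
theorem cleanA_run (c : Char) :
    ∀ n : ℕ, ∀ t : List Char, t.head? ≠ some c →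
      cleanA (List.replicate n c ++ t) = List.replicate ((n + 1) / 2) c ++ cleanA t := by
  intro n
  induction n using Nat.strong_induction_on with
  | _ n ih =>
    match n with
    | 0 => intro t _; simp
    | 1 =>
      intro t ht
      match t with
      | [] => simp [cleanA]
      | d :: t' =>
        have hdc : (c == d) = false := by
          simp only [List.head?] at ht
          simp
          intro h; exact ht (by rw [h])
        simp [cleanA, hdc]
    | (m + 2) =>
      intro t ht
      have : List.replicate (m + 2) c ++ t = c :: c :: (List.replicate m c ++ t) := by
        simp [List.replicate_succ]
      rw [this]
      have hrec := ih m (by omega) t ht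
      simp only [cleanA, beq_self_eq_true, if_true, hrec]
      have : (m + 2 + 1) / 2 = (m + 1) / 2 + 1 := by omega
      rw [this, List.replicate_succ]
      simp

theorem cleanA_eq_runsB : ∀ l : List Char, cleanA l = runsB l := by
  suffices h : ∀ (n : ℕ) (l : List Char), l.length = n → cleanA l = runsB l from
    fun l => h l.length l rfl
  intro n
  induction n using Nat.strong_induction_on with
  | _ n ih =>
    intro l hl
    match l with
    | [] => simp [cleanA, runsB]
    | c :: rest =>
      have hsplit : rest.takeWhile (· == c) ++ rest.dropWhile (· == c) = rest :=
        List.takeWhile_append_dropWhile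
      set k := (rest.takeWhile (· == c)).length with hk
      have hdrop : rest.dropWhile (· == c) = rest.drop k := by
        rw [dropWhile_eq_drop_len_takeWhile]
      have hrest : rest = List.replicate k c ++ rest.drop k := by
        conv_lhs => rw [← hsplit]
        rw [hdrop, hk, ← takeWhile_eq_replicate]
      have hhead : (rest.drop k).head? ≠ some c := by
        intro h
        rw [← hdrop] at h
        exact head?_dropWhile_not (· == c) rest c h (by simp)
      have hlen : (rest.drop k).length < n := by
        have h1 : (rest.drop k).length ≤ rest.length := by simp
        simp only [List.length_cons] at hl
        omega
      have hIH : cleanA (rest.drop k) = runsB (rest.drop k) :=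
        ih (rest.drop k).length hlen _ rfl
      have hcons : c :: rest = List.replicate (k + 1) c ++ rest.drop k := by
        rw [List.replicate_succ, List.cons_append, ← hrest]
      have hr : runsB (c :: rest) = List.replicate ((k + 2) / 2) c ++ runsB (rest.drop k) := by
        simp [runsB, hk]
      calc cleanA (c :: rest)
          = cleanA (List.replicate (k + 1) c ++ rest.drop k) := by rw [← hcons]
        _ = List.replicate ((k + 1 + 1) / 2) c ++ cleanA (rest.drop k) :=
            cleanA_run c (k + 1) (rest.drop k) hhead
        _ = List.replicate ((k + 2) / 2) c ++ runsB (rest.drop k) := by rw [hIH]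
        _ = runsB (c :: rest) := hr.symm

-- ===== VERDICT (by name: the statement is the Claim_ definition above) =====
theorem clean_doubled_text_spec : Claim_equal_clean_doubled_text := by
  intro text _
  unfold Spec_clean_doubled_text clean_doubled_text clean_doubled_text_alt
  rw [cleanA_eq_runsB]
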